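-- pv_equiv track=rewrite | github.com/BrownFortress/rmp | graph.py | get_min_at_max
-- ===== SOURCE A (Python) =====
-- def get_min_at_max(lengths, costs):
--     min_cost = min(costs)
--     new_l = []
--     new_c = []
--     for idx, x in enumerate(costs):
--         if x == min_cost:
--             new_c.append(x)
--             new_l.append(lengths[idx])
--
--     id_best = new_l.index(max(new_l))
--
--     return new_c[id_best], max(new_l)
-- ===== SOURCE B (Python) =====
-- def get_min_at_max(lengths, costs):
--     # One lexicographic pass: smallest cost, and among ties the largest length.
--     best_c, neg_l = min((c, -l) for c, l in zip(costs, lengths))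
--     return best_c, -neg_l
-- ===== Notes on version B (the rewrite author's own statement) =====
-- stated objective: simpler
-- what changed: Replaced A's min->filter-with-enumerate->max->index pipeline (four passes and two intermediate lists) by a single keyed min over zip(costs, lengths) with key (cost, -length), returning that pair directly.
import Mathlib
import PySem

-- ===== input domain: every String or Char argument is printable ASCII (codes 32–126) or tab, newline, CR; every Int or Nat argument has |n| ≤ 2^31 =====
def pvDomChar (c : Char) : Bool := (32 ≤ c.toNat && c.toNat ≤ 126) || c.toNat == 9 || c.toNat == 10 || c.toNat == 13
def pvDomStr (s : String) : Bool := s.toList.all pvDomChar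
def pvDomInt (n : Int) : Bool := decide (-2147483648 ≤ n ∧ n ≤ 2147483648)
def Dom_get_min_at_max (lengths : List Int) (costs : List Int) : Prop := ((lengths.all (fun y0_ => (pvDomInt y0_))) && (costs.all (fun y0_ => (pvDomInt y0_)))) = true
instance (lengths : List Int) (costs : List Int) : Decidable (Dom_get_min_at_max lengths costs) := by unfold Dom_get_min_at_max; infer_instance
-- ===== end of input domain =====

-- B replaces A's min→filter→max→index pipeline with one lexicographic min over zip(costs, lengths).

-- ===== PORT A =====
def get_min_at_max (lengths : List Int) (costs : List Int) : Int × Int :=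
  let min_cost := (PySem.List.min? costs (fun x => x)).getD 0
  let st := (PySem.List.enumerate costs).foldl
      (fun (st : List Int × List Int) p =>
        if p.2 == min_cost then
          (st.1 ++ [(PySem.List.pyGet? lengths p.1).getD 0], st.2 ++ [p.2])
        else st) ([], [])
  let new_l := st.1
  let new_c := st.2
  let mx := (PySem.List.max? new_l (fun x => x)).getD 0
  let id_best := (PySem.List.index? new_l mx).getD 0
  ((PySem.List.pyGet? new_c (id_best : Int)).getD 0, mx)

-- ===== PORT B =====
-- Python's min over tuples keeps the first lexicographically smallest element: a running fold.
def get_min_at_max_alt (lengths : List Int) (costs : List Int) : Int × Int :=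
  match (costs.zip lengths).map (fun p => (p.1, -p.2)) with
  | [] => (0, 0)   -- Python raises ValueError here (outside Pre_)
  | q :: rest =>
      let best := rest.foldl
        (fun b q' => if q'.1 < b.1 ∨ (q'.1 = b.1 ∧ q'.2 < b.2) then q' else b) q
      (best.1, -best.2)

-- ===== PRECONDITION & SPEC =====
-- Pre_ excludes exactly the inputs where Python A raises: empty costs (ValueError from
-- min([])), and inputs where some index holding a minimal cost is out of range for
-- lengths (IndexError on lengths[idx]).
def Pre_get_min_at_max (lengths : List Int) (costs : List Int) : Prop :=
  costs ≠ [] ∧ ∀ i (_ : i < costs.length), lengths.length ≤ i →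
    ∃ j, ∃ _ : j < costs.length, costs[j] < costs[i]
instance (lengths : List Int) (costs : List Int) : Decidable (Pre_get_min_at_max lengths costs) := by
  unfold Pre_get_min_at_max; infer_instance
def pvWitness_get_min_at_max : List Int × List Int := ([5, 6, 7], [2, 1, 1])

def Spec_get_min_at_max (lengths : List Int) (costs : List Int) (out : Int × Int) : Prop := out = get_min_at_max_alt lengths costs
instance (lengths : List Int) (costs : List Int) (out : Int × Int) : Decidable (Spec_get_min_at_max lengths costs out) := by unfold Spec_get_min_at_max; infer_instance

-- ===== CLAIM (what is proved, stated in full; the proofs are below) =====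
def Claim_equal_get_min_at_max : Prop := ∀ (lengths : List Int) (costs : List Int), Dom_get_min_at_max lengths costs → Pre_get_min_at_max lengths costs → Spec_get_min_at_max lengths costs (get_min_at_max lengths costs)

-- ===== LEMMAS AND PROOFS =====

-- the conditional pair-building loop splits into two append loops
theorem foldl_pair_split (l : List (Int × Int)) (p : Int × Int → Bool)
    (f g : Int × Int → Int) (a b : List Int) :
    l.foldl (fun st x => if p x then (st.1 ++ [f x], st.2 ++ [g x]) else st) (a, b)
    = (a ++ (l.filter p).map f, b ++ (l.filter p).map g) := by
  induction l generalizing a b with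
  | nil => simp
  | cons x t ih => by_cases h : p x <;> simp [h, ih]

-- A's new_l equals the lengths column of the min-cost-filtered zip, given that every
-- index passing the filter is in range for lengths
theorem newl_eq (m : Int) (costs : List Int) : ∀ (ls pre : List Int),
    (∀ i (_ : i < costs.length), costs[i] = m → i < ls.length) →
    ((PySem.List.enumerate costs (pre.length : Int)).filter (fun q => q.2 == m)).map
        (fun q => (PySem.List.pyGet? (pre ++ ls) q.1).getD 0)
    = ((costs.zip ls).filter (fun q => q.1 == m)).map (·.2) := by
  induction costs with
  | nil => intro ls pre h; simp [PySem.List.enumerate]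
  | cons c cs ih =>
    intro ls pre h
    rw [PySem.List.enumerate_cons]
    cases ls with
    | nil =>
      have hnone : ∀ q ∈ PySem.List.enumerate (c :: cs) (pre.length : Int), ¬ (q.2 == m) := by
        intro q hq
        rw [PySem.List.mem_enumerate_iff] at hq
        obtain ⟨k, hk, rfl⟩ := hq
        simp only [beq_iff_eq]
        intro he
        exact absurd (h k hk he) (by simp)
      rw [← PySem.List.enumerate_cons]
      rw [List.filter_eq_nil_iff.mpr (fun q hq => by simpa using hnone q hq)]
      simp
    | cons l ls' =>
      have hget : PySem.List.pyGet? (pre ++ l :: ls') (pre.length : Int) = some l := by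
        rw [PySem.List.pyGet?_natCast]
        simp
      have hstep : ((pre.length : Int) + 1) = ((pre ++ [l]).length : Int) := by simp
      have hre : pre ++ l :: ls' = (pre ++ [l]) ++ ls' := by simp
      rw [List.filter_cons]
      by_cases hc : c = m
      · simp only [hc, beq_self_eq_true, if_pos, List.map_cons, List.zip_cons_cons,
          List.filter_cons, hget]
        rw [hstep, hre, ih ls' (pre ++ [l]) (fun i hi he => by
          have := h (i+1) (by simpa using hi) (by simpa using he); simpa using this)]
        simp
      · simp only [List.zip_cons_cons, List.filter_cons]
        have : (c == m) = false := by simpa using hc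
        simp only [this, if_neg, Bool.false_eq_true, not_false_iff]
        rw [hstep, hre, ih ls' (pre ++ [l]) (fun i hi he => by
          have := h (i+1) (by simpa using hi) (by simpa using he); simpa using this)]

theorem newl_eq0 (m : Int) (costs ls : List Int)
    (h : ∀ i (_ : i < costs.length), costs[i] = m → i < ls.length) :
    ((PySem.List.enumerate costs 0).filter (fun q => q.2 == m)).map
        (fun q => (PySem.List.pyGet? ls q.1).getD 0)
    = ((costs.zip ls).filter (fun q => q.1 == m)).map (·.2) := by
  simpa using newl_eq m costs ls [] h

theorem lexle_trans (a b c : Int × Int)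
    (h1 : a.1 < b.1 ∨ (a.1 = b.1 ∧ a.2 ≤ b.2))
    (h2 : b.1 < c.1 ∨ (b.1 = c.1 ∧ b.2 ≤ c.2)) :
    a.1 < c.1 ∨ (a.1 = c.1 ∧ a.2 ≤ c.2) := by
  rcases h1 with h1 | ⟨h1, h1'⟩ <;> rcases h2 with h2 | ⟨h2, h2'⟩
  · exact Or.inl (lt_trans h1 h2)
  · exact Or.inl (h2 ▸ h1)
  · exact Or.inl (h1 ▸ h2)
  · exact Or.inr ⟨h1.trans h2, le_trans h1' h2'⟩

-- B's fold computes a member of q :: rest that is lexicographically ≤ every element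
theorem fold_min_lex (rest : List (Int × Int)) (q : Int × Int) :
    (rest.foldl (fun b q' => if q'.1 < b.1 ∨ (q'.1 = b.1 ∧ q'.2 < b.2) then q' else b) q)
      ∈ (q :: rest)
    ∧ ∀ p ∈ (q :: rest),
        (rest.foldl (fun b q' => if q'.1 < b.1 ∨ (q'.1 = b.1 ∧ q'.2 < b.2) then q' else b) q).1 < p.1
        ∨ ((rest.foldl (fun b q' => if q'.1 < b.1 ∨ (q'.1 = b.1 ∧ q'.2 < b.2) then q' else b) q).1 = p.1
           ∧ (rest.foldl (fun b q' => if q'.1 < b.1 ∨ (q'.1 = b.1 ∧ q'.2 < b.2) then q' else b) q).2 ≤ p.2) := by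
  induction rest generalizing q with
  | nil =>
    refine ⟨List.mem_singleton.mpr rfl, ?_⟩
    intro p hp
    rw [List.mem_singleton] at hp
    subst hp
    exact Or.inr ⟨rfl, le_refl _⟩
  | cons r t ih =>
    simp only [List.foldl_cons]
    set q' := if r.1 < q.1 ∨ (r.1 = q.1 ∧ r.2 < q.2) then r else q with hq'
    obtain ⟨hmem, hmin⟩ := ih q'
    have hq'qr : q' = r ∨ q' = q := by
      rw [hq']; split_ifs <;> simp
    have hle_q : q'.1 < q.1 ∨ (q'.1 = q.1 ∧ q'.2 ≤ q.2) := by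
      rw [hq']; split_ifs with h
      · rcases h with h | ⟨h, h'⟩
        · exact Or.inl h
        · exact Or.inr ⟨h, le_of_lt h'⟩
      · exact Or.inr ⟨rfl, le_refl _⟩
    have hle_r : q'.1 < r.1 ∨ (q'.1 = r.1 ∧ q'.2 ≤ r.2) := by
      rw [hq']; split_ifs with h
      · exact Or.inr ⟨rfl, le_refl _⟩
      · push_neg at h
        omega
    constructor
    · rcases List.mem_cons.mp hmem with h | h
      · rcases hq'qr with h2 | h2 <;> rw [h, h2] <;> simp
      · exact List.mem_cons_of_mem _ (List.mem_cons_of_mem _ h)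
    · intro p hp
      have hresle : _ := hmin q' (List.mem_cons_self)
      rcases List.mem_cons.mp hp with h | h
      · exact lexle_trans _ _ _ hresle (h ▸ hle_q)
      rcases List.mem_cons.mp h with h2 | h2
      · exact lexle_trans _ _ _ hresle (h2 ▸ hle_r)
      · exact hmin p (List.mem_cons_of_mem _ h2)

-- A's pipeline, written in terms of the filtered zip list and the filtered enumerate list
theorem A_val (lengths : List Int) (c : Int) (t : List Int)
    (hidx : ∀ i (_ : i < (c :: t).length), (c :: t)[i] = t.foldl min c → i < lengths.length) :
    get_min_at_max lengths (c :: t)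
    = ((PySem.List.pyGet?
          (((PySem.List.enumerate (c :: t) 0).filter (fun q => q.2 == t.foldl min c)).map (·.2))
          (((PySem.List.index? ((((c :: t).zip lengths).filter (fun q => q.1 == t.foldl min c)).map (·.2))
              ((PySem.List.max? ((((c :: t).zip lengths).filter (fun q => q.1 == t.foldl min c)).map (·.2)) (fun x => x)).getD 0)).getD 0 : Int))).getD 0,
        (PySem.List.max? ((((c :: t).zip lengths).filter (fun q => q.1 == t.foldl min c)).map (·.2)) (fun x => x)).getD 0) := by
  have hmc : (PySem.List.min? (c :: t) (fun x => x)).getD 0 = t.foldl min c := by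
    rw [PySem.List.min?_id_cons]; rfl
  simp only [get_min_at_max]
  rw [hmc, foldl_pair_split]
  simp only [List.nil_append]
  rw [newl_eq0 (t.foldl min c) (c :: t) lengths (by simpa using hidx)]

-- B's fold yields (m, M) when m is the least cost and M the largest length tied with it
theorem B_val (lengths costs : List Int) (m M : Int)
    (hm_le : ∀ x ∈ costs, m ≤ x)
    (hmem : (m, M) ∈ costs.zip lengths)
    (hMmax : ∀ p ∈ costs.zip lengths, p.1 = m → p.2 ≤ M) :
    get_min_at_max_alt lengths costs = (m, M) := by
  have hmm : (m, -M) ∈ (costs.zip lengths).map (fun p => (p.1, -p.2)) :=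
    List.mem_map.mpr ⟨(m, M), hmem, rfl⟩
  unfold get_min_at_max_alt
  cases hzs : (costs.zip lengths).map (fun p => (p.1, -p.2)) with
  | nil => rw [hzs] at hmm; simp at hmm
  | cons q rest =>
    rw [hzs] at hmm
    obtain ⟨hrmem, hrmin⟩ := fold_min_lex rest q
    set r := rest.foldl (fun b q' => if q'.1 < b.1 ∨ (q'.1 = b.1 ∧ q'.2 < b.2) then q' else b) q with hr
    have : r ∈ (costs.zip lengths).map (fun p => (p.1, -p.2)) := by rw [hzs]; exact hrmem
    obtain ⟨pl, hpl, hplr⟩ := List.mem_map.mp this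
    have hple : m ≤ pl.1 := hm_le _ (List.of_mem_zip hpl).1
    have hlex := hrmin _ hmm
    have hr1 : r.1 = m := by
      rw [← hplr] at hlex ⊢
      simp only at hlex ⊢
      omega
    have hr2 : r.2 = -M := by
      have hMle : r.2 ≤ -M := by
        rcases hlex with h | h
        · rw [hr1] at h; omega
        · exact h.2
      have : pl.2 ≤ M := hMmax pl hpl (by rw [← hplr] at hr1; exact hr1)
      rw [← hplr] at hMle ⊢
      simp only at hMle ⊢
      omega
    simp only []
    rw [hr1, hr2]
    norm_num

-- ===== VERDICT (by name: the statement is the Claim_ definition above) =====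
theorem get_min_at_max_spec : Claim_equal_get_min_at_max := by
  intro lengths costs _ hpre
  unfold Spec_get_min_at_max
  obtain ⟨hne, hidx0⟩ := hpre
  obtain ⟨c, t, rfl⟩ := List.exists_cons_of_ne_nil hne
  have hm_le : ∀ x ∈ c :: t, t.foldl min c ≤ x := by
    intro x hx
    rcases List.mem_cons.mp hx with rfl | hx
    · exact (PySem.List.foldl_min_le t x).1
    · exact (PySem.List.foldl_min_le t c).2 x hx
  have hm_mem : t.foldl min c ∈ c :: t := by
    rcases PySem.List.foldl_min_mem t c with h | h
    · rw [h]; exact List.mem_cons_self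
    · exact List.mem_cons_of_mem _ h
  have hidx : ∀ i (hi : i < (c :: t).length), (c :: t)[i] = t.foldl min c → i < lengths.length := by
    intro i hi he
    by_contra hcon
    push_neg at hcon
    obtain ⟨j, hj, hlt⟩ := hidx0 i hi hcon
    have := hm_le _ (List.getElem_mem hj)
    omega
  -- the filtered-zip lengths column is nonempty
  obtain ⟨i, hi, hci⟩ := List.mem_iff_getElem.mp hm_mem
  have hil : i < lengths.length := hidx i hi hci
  have hziplen : i < ((c :: t).zip lengths).length := by
    rw [List.length_zip]; omega
  have hmemz : ((c :: t)[i], lengths[i]) ∈ (c :: t).zip lengths := by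
    have h := List.getElem_zip (l := c :: t) (l' := lengths) (i := i) (h := hziplen)
    exact h ▸ List.getElem_mem hziplen
  have hmem : (t.foldl min c, lengths[i]) ∈ (c :: t).zip lengths := hci ▸ hmemz
  have hLmem : lengths[i] ∈ (((c :: t).zip lengths).filter (fun q => q.1 == t.foldl min c)).map (·.2) :=
    List.mem_map.mpr ⟨(t.foldl min c, lengths[i]), List.mem_filter.mpr ⟨hmem, by simp⟩, rfl⟩
  have hLne : (((c :: t).zip lengths).filter (fun q => q.1 == t.foldl min c)).map (·.2) ≠ [] := by
    intro h; rw [h] at hLmem; simp at hLmem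
  cases hM : PySem.List.max? ((((c :: t).zip lengths).filter (fun q => q.1 == t.foldl min c)).map (·.2)) (fun x => x) with
  | none => exact absurd ((PySem.List.max?_eq_none_iff _ _).mp hM) hLne
  | some M =>
  have hML : M ∈ (((c :: t).zip lengths).filter (fun q => q.1 == t.foldl min c)).map (·.2) :=
    PySem.List.max?_mem hM
  have hMmax' : ∀ y ∈ (((c :: t).zip lengths).filter (fun q => q.1 == t.foldl min c)).map (·.2), y ≤ M :=
    PySem.List.max?_isMax hM
  have hMmax : ∀ p ∈ (c :: t).zip lengths, p.1 = t.foldl min c → p.2 ≤ M := by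
    intro p hp h1
    exact hMmax' p.2 (List.mem_map.mpr ⟨p, List.mem_filter.mpr ⟨hp, by simp [h1]⟩, rfl⟩)
  obtain ⟨qM, hqM, hqM2⟩ := List.mem_map.mp hML
  have hqMf := List.mem_filter.mp hqM
  have hqM1 : qM.1 = t.foldl min c := by simpa using hqMf.2
  have hmemM : (t.foldl min c, M) ∈ (c :: t).zip lengths := by
    have hq : qM = (t.foldl min c, M) := by
      rcases qM with ⟨a, b⟩
      simp only at hqM1 hqM2
      rw [hqM1, hqM2]
    rw [← hq]; exact hqMf.1
  rw [B_val lengths (c :: t) (t.foldl min c) M hm_le hmemM hMmax]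
  rw [A_val lengths c t hidx]
  rw [hM]
  simp only [Option.getD_some]
  -- first component: index into new_c, every element of which is the min cost
  cases hk : PySem.List.index? ((((c :: t).zip lengths).filter (fun q => q.1 == t.foldl min c)).map (·.2)) M with
  | none =>
    exact absurd ((PySem.List.index?_eq_none_iff _ _).mp hk) (by simpa using hML)
  | some k =>
  obtain ⟨hkl, hLk, _⟩ := PySem.List.getElem_of_index?_eq_some hk
  have hClen : (((PySem.List.enumerate (c :: t) 0).filter (fun q => q.2 == t.foldl min c)).map ((·.2) : Int × Int → Int)).length
      = ((((c :: t).zip lengths).filter (fun q => q.1 == t.foldl min c)).map ((·.2) : Int × Int → Int)).length := by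
    rw [← newl_eq0 (t.foldl min c) (c :: t) lengths hidx]
    simp
  have hkC : k < (((PySem.List.enumerate (c :: t) 0).filter (fun q => q.2 == t.foldl min c)).map ((·.2) : Int × Int → Int)).length := by
    rw [hClen]; exact hkl
  simp only [Option.getD_some, PySem.List.pyGet?_natCast]
  rw [List.getElem?_eq_getElem hkC]
  have hCk : (((PySem.List.enumerate (c :: t) 0).filter (fun q => q.2 == t.foldl min c)).map ((·.2) : Int × Int → Int))[k] = t.foldl min c := by
    have hmemk := List.getElem_mem hkC
    obtain ⟨qk, hqk, hqk2⟩ := List.mem_map.mp hmemk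
    have := (List.mem_filter.mp hqk).2
    rw [← hqk2]
    simpa using this
  rw [hCk]
  simp
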